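-- pv_equiv track=rewrite | github.com/crave33/promptzone | promptzone_core.py | infer_tags_from_name
-- ===== SOURCE A (Python) =====
-- def infer_tags_from_name(folder_name: str) -> list[str]:
--     n = folder_name.lower()
--     tags = set()
--     if any(k in n for k in ["street", "paparazzi", "candid", "urban", "alley", "sidewalk", "flash", "night"]):
--         tags.add("street")
--     if any(k in n for k in ["studio", "backdrop", "seamless", "softbox", "keylight", "portrait"]):
--         tags.add("studio")
--     if any(k in n for k in ["vintage", "retro", "pinup", "noir", "film", "classic", "cafe"]):
--         tags.add("vintage")
--     if any(k in n for k in ["fantasy", "gothic", "dark", "myth", "angel", "demon", "castle", "sorcer"]):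
--         tags.add("fantasy")
--     if not tags:
--         tags.add("other")
--     return sorted(tags)
-- ===== SOURCE B (Python) =====
-- KEYWORD_TAG = {
--     "street": "street", "paparazzi": "street", "candid": "street", "urban": "street",
--     "alley": "street", "sidewalk": "street", "flash": "street", "night": "street",
--     "studio": "studio", "backdrop": "studio", "seamless": "studio", "softbox": "studio",
--     "keylight": "studio", "portrait": "studio",
--     "vintage": "vintage", "retro": "vintage", "pinup": "vintage", "noir": "vintage",
--     "film": "vintage", "classic": "vintage", "cafe": "vintage",
--     "fantasy": "fantasy", "gothic": "fantasy", "dark": "fantasy", "myth": "fantasy",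
--     "angel": "fantasy", "demon": "fantasy", "castle": "fantasy", "sorcer": "fantasy",
-- }
--
-- def infer_tags_from_name(folder_name: str) -> list[str]:
--     n = folder_name.lower()
--     tags = {tag for i in range(len(n))
--                 for kw, tag in KEYWORD_TAG.items() if n.startswith(kw, i)}
--     return sorted(tags) if tags else ["other"]
-- ===== Notes on version B (the rewrite author's own statement) =====
-- stated objective: alternative
-- what changed: Inverts the search: instead of four per-tag branches each running an any-substring scan, B builds a keyword-to-tag map, scans each start position of the lowered name once, and collects the tag of every keyword that starts there, keeping the empty-set fallback and the final sort.
import Mathlib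
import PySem

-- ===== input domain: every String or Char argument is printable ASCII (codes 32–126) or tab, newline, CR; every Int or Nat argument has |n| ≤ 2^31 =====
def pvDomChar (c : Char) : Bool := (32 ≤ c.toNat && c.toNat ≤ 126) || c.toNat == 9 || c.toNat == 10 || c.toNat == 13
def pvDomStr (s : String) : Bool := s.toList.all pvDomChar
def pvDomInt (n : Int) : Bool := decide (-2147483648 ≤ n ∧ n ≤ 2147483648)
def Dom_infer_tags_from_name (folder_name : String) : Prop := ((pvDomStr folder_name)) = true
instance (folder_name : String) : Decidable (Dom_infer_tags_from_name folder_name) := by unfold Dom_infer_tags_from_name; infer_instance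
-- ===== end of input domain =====

-- B inverts the search: instead of four per-tag any-substring branches it scans each start
-- position of the lowered name once and looks matching keywords up in a keyword→tag map
-- (alternative decomposition; the empty-set fallback and final sort are preserved).

-- ===== PORT A =====
def infer_tags_from_name (folder_name : String) : List String :=
  let n := PySem.Str.lower folder_name
  let tags : PySem.Set String := PySem.Set.empty
  let tags := if (["street", "paparazzi", "candid", "urban", "alley", "sidewalk", "flash", "night"].any fun k => PySem.Str.isIn k n) then PySem.Set.add tags "street" else tags
  let tags := if (["studio", "backdrop", "seamless", "softbox", "keylight", "portrait"].any fun k => PySem.Str.isIn k n) then PySem.Set.add tags "studio" else tags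
  let tags := if (["vintage", "retro", "pinup", "noir", "film", "classic", "cafe"].any fun k => PySem.Str.isIn k n) then PySem.Set.add tags "vintage" else tags
  let tags := if (["fantasy", "gothic", "dark", "myth", "angel", "demon", "castle", "sorcer"].any fun k => PySem.Str.isIn k n) then PySem.Set.add tags "fantasy" else tags
  let tags := if tags = [] then PySem.Set.add tags "other" else tags
  PySem.List.sorted tags (fun x => x) false

-- ===== PORT B =====
-- B's keyword → tag map (insertion order of Source B's dict)
def pvKeywordTag : List (String × String) :=
  [("street", "street"), ("paparazzi", "street"), ("candid", "street"), ("urban", "street"),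
   ("alley", "street"), ("sidewalk", "street"), ("flash", "street"), ("night", "street"),
   ("studio", "studio"), ("backdrop", "studio"), ("seamless", "studio"), ("softbox", "studio"),
   ("keylight", "studio"), ("portrait", "studio"),
   ("vintage", "vintage"), ("retro", "vintage"), ("pinup", "vintage"), ("noir", "vintage"),
   ("film", "vintage"), ("classic", "vintage"), ("cafe", "vintage"),
   ("fantasy", "fantasy"), ("gothic", "fantasy"), ("dark", "fantasy"), ("myth", "fantasy"),
   ("angel", "fantasy"), ("demon", "fantasy"), ("castle", "fantasy"), ("sorcer", "fantasy")]

-- n.startswith(kw, i) with 0 ≤ i is ported exactly as: kw.toList is a prefix of n.toList.drop i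
def infer_tags_from_name_alt (folder_name : String) : List String :=
  let cs := (PySem.Str.lower folder_name).toList
  let tags : PySem.Set String :=
    (PySem.List.pyRange 0 cs.length 1).foldl (fun acc i =>
      pvKeywordTag.foldl (fun acc2 p =>
        if PySem.Chars.startswith (cs.drop i.toNat) p.1.toList then PySem.Set.add acc2 p.2 else acc2) acc)
      PySem.Set.empty
  if tags = [] then ["other"] else PySem.List.sorted tags (fun x => x) false

-- ===== PRECONDITION & SPEC =====
def Spec_infer_tags_from_name (folder_name : String) (out : List String) : Prop := out = infer_tags_from_name_alt folder_name
instance (folder_name : String) (out : List String) : Decidable (Spec_infer_tags_from_name folder_name out) := by unfold Spec_infer_tags_from_name; infer_instance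

-- ===== CLAIM (what is proved, stated in full; the proofs are below) =====
def Claim_equal_infer_tags_from_name : Prop := ∀ (folder_name : String), Dom_infer_tags_from_name folder_name → Spec_infer_tags_from_name folder_name (infer_tags_from_name folder_name)

-- ===== LEMMAS AND PROOFS =====

-- membership / nodup through A's conditional add
theorem pv_mem_addIf (b : Bool) (s : List String) (x y : String) :
    y ∈ (if b then PySem.Set.add s x else s) ↔ y ∈ s ∨ (b = true ∧ y = x) := by
  cases b <;> simp [PySem.Set.mem_add]

theorem pv_nodup_addIf (b : Bool) (s : List String) (x : String) (h : s.Nodup) :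
    (if b then PySem.Set.add s x else s).Nodup := by
  cases b
  · exact h
  · exact PySem.Set.nodup_add _ _ h

-- membership and nodup through B's nested conditional-add fold
theorem pv_mem_foldl2 {β : Type} (outer : List β) (c : β → String × String → Bool)
    (init : List String) (y : String) :
    y ∈ outer.foldl (fun acc i =>
        pvKeywordTag.foldl (fun a2 p => if c i p then PySem.Set.add a2 p.2 else a2) acc) init ↔
    y ∈ init ∨ ∃ i ∈ outer, ∃ p ∈ pvKeywordTag, c i p = true ∧ y = p.2 := by
  have hin : ∀ (i : β) (tbl : List (String × String)) (acc : List String),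
      y ∈ tbl.foldl (fun a2 p => if c i p then PySem.Set.add a2 p.2 else a2) acc ↔
      y ∈ acc ∨ ∃ p ∈ tbl, c i p = true ∧ y = p.2 := by
    intro i tbl
    induction tbl with
    | nil => simp
    | cons q qs ihq =>
      intro acc
      rw [List.foldl_cons]
      by_cases hc : c i q = true
      · rw [if_pos hc, ihq]
        simp only [PySem.Set.mem_add, List.mem_cons]
        constructor
        · rintro (⟨h1 | h1⟩ | ⟨p, hp, hcp, hy⟩)
          · exact Or.inl h1
          · exact Or.inr ⟨q, Or.inl rfl, hc, h1⟩
          · exact Or.inr ⟨p, Or.inr hp, hcp, hy⟩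
        · rintro (h1 | ⟨p, hp | hp, hcp, hy⟩)
          · exact Or.inl (Or.inl h1)
          · exact Or.inl (Or.inr (hp ▸ hy))
          · exact Or.inr ⟨p, hp, hcp, hy⟩
      · rw [if_neg hc, ihq]
        simp only [List.mem_cons]
        constructor
        · rintro (h1 | ⟨p, hp, hcp, hy⟩)
          · exact Or.inl h1
          · exact Or.inr ⟨p, Or.inr hp, hcp, hy⟩
        · rintro (h1 | ⟨p, hp | hp, hcp, hy⟩)
          · exact Or.inl h1
          · exact absurd (hp ▸ hcp) hc
          · exact Or.inr ⟨p, hp, hcp, hy⟩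
  induction outer generalizing init with
  | nil => simp
  | cons h t ih =>
    rw [List.foldl_cons]
    refine Iff.trans (ih _) ?_
    rw [hin h pvKeywordTag init]
    simp only [List.mem_cons]
    constructor
    · rintro ((h1 | ⟨p, hp, hcp, hy⟩) | ⟨i, hi, p, hp, hcp, hy⟩)
      · exact Or.inl h1
      · exact Or.inr ⟨h, Or.inl rfl, p, hp, hcp, hy⟩
      · exact Or.inr ⟨i, Or.inr hi, p, hp, hcp, hy⟩
    · rintro (h1 | ⟨i, hi | hi, p, hp, hcp, hy⟩)
      · exact Or.inl (Or.inl h1)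
      · exact Or.inl (Or.inr ⟨p, hp, hi ▸ hcp, hy⟩)
      · exact Or.inr ⟨i, hi, p, hp, hcp, hy⟩

theorem pv_nodup_foldl2 {β : Type} (outer : List β) (c : β → String × String → Bool)
    (init : List String) (h : init.Nodup) :
    (outer.foldl (fun acc i =>
        pvKeywordTag.foldl (fun a2 p => if c i p then PySem.Set.add a2 p.2 else a2) acc) init).Nodup := by
  have hin : ∀ (i : β) (tbl : List (String × String)) (acc : List String), acc.Nodup →
      (tbl.foldl (fun a2 p => if c i p then PySem.Set.add a2 p.2 else a2) acc).Nodup := by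
    intro i tbl
    induction tbl with
    | nil => exact fun _ h => h
    | cons q qs ihq =>
      intro acc hacc
      rw [List.foldl_cons]
      split
      · exact ihq _ (PySem.Set.nodup_add _ _ hacc)
      · exact ihq _ hacc
  induction outer generalizing init with
  | nil => exact h
  | cons hd t ih =>
    rw [List.foldl_cons]
    exact ih _ (hin _ _ _ h)

-- a nonempty keyword occurs in cs iff it starts at some position of range(len(cs))
theorem pv_exists_range_startswith (cs kw : List Char) (hkw : kw ≠ []) :
    (∃ i ∈ PySem.List.pyRange 0 (cs.length : Int) 1,
        PySem.Chars.startswith (cs.drop i.toNat) kw = true) ↔ PySem.Chars.isIn kw cs = true := by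
  rw [← PySem.Chars.exists_prefix_drop_iff_isIn]
  constructor
  · rintro ⟨i, _, hsw⟩
    exact ⟨i.toNat, (PySem.Chars.startswith_iff _ _).1 hsw⟩
  · rintro ⟨j, hj⟩
    have hjlt : j < cs.length := by
      by_contra hge
      rw [not_lt] at hge
      rw [List.drop_eq_nil_of_le hge, List.prefix_nil] at hj
      exact hkw hj
    refine ⟨(j : Int), ?_, ?_⟩
    · rw [PySem.List.mem_pyRange_one]
      exact ⟨Int.natCast_nonneg j, by exact_mod_cast hjlt⟩
    · rw [PySem.Chars.startswith_iff]
      simpa using hj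

theorem pv_table_keywords_ne_nil : ∀ p ∈ pvKeywordTag, p.1.toList ≠ [] := by decide

-- membership in B's tag set, characterised by plain substring tests
theorem pv_memB (cs : List Char) (y : String) :
    (y ∈ (PySem.List.pyRange 0 (cs.length : Int) 1).foldl (fun acc i =>
        pvKeywordTag.foldl (fun a2 p =>
          if PySem.Chars.startswith (cs.drop i.toNat) p.1.toList then PySem.Set.add a2 p.2 else a2) acc)
      PySem.Set.empty) ↔
    ∃ p ∈ pvKeywordTag, PySem.Chars.isIn p.1.toList cs = true ∧ y = p.2 := by
  rw [pv_mem_foldl2]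
  simp only [PySem.Set.empty, List.not_mem_nil, false_or]
  constructor
  · rintro ⟨i, hi, p, hp, hc, hy⟩
    exact ⟨p, hp, (pv_exists_range_startswith cs p.1.toList (pv_table_keywords_ne_nil p hp)).1 ⟨i, hi, hc⟩, hy⟩
  · rintro ⟨p, hp, hin, hy⟩
    obtain ⟨i, hi, hc⟩ := (pv_exists_range_startswith cs p.1.toList (pv_table_keywords_ne_nil p hp)).2 hin
    exact ⟨i, hi, p, hp, hc, hy⟩

-- from equal membership of the two nodup tag sets to equal final results
theorem pv_final (tA tB : List String) (hA : tA.Nodup) (hB : tB.Nodup)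
    (hmem : ∀ y, y ∈ tA ↔ y ∈ tB) :
    PySem.List.sorted (if tA = [] then PySem.Set.add tA "other" else tA) (fun x => x) false
      = (if tB = [] then ["other"] else PySem.List.sorted tB (fun x => x) false) := by
  have hperm : tA.Perm tB := (List.perm_ext_iff_of_nodup hA hB).2 hmem
  by_cases hB0 : tB = []
  · subst hB0
    have hA0 : tA = [] := hperm.eq_nil
    subst hA0
    decide
  · have hA0 : tA ≠ [] := fun h => hB0 ((h ▸ hperm).symm.eq_nil)
    rw [if_neg hA0, if_neg hB0]
    exact PySem.List.sorted_eq_sorted_of_perm tA tB (fun x => x) (fun a b h => h) hperm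

-- ===== VERDICT (by name: the statement is the Claim_ definition above) =====
theorem infer_tags_from_name_spec : Claim_equal_infer_tags_from_name := by
  intro s _
  unfold Spec_infer_tags_from_name infer_tags_from_name infer_tags_from_name_alt
  refine pv_final _ _ ?_ ?_ ?_
  · exact pv_nodup_addIf _ _ _ (pv_nodup_addIf _ _ _ (pv_nodup_addIf _ _ _ (pv_nodup_addIf _ _ _ List.nodup_nil)))
  · exact pv_nodup_foldl2 _ _ _ List.nodup_nil
  · intro y
    rw [pv_memB, pv_mem_addIf, pv_mem_addIf, pv_mem_addIf, pv_mem_addIf]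
    simp only [pvKeywordTag, List.exists_mem_cons_iff, List.not_mem_nil, List.any_cons,
      List.any_nil, Bool.or_eq_true, PySem.Str.isIn_eq, PySem.Set.empty, false_or,
      Bool.false_eq_true, false_and, exists_false, or_false, or_and_right, or_assoc]
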